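-- pv_equiv track=rewrite | github.com/KjartanvanDriel/obsidian-wiki-mcp | src/obsidian_wiki_mcp/vault.py | _patch_section
-- ===== SOURCE A (Python) =====
-- def _patch_section(
--
--     body: str,
--     section: str,
--     section_content: str | None = None,
--     append_text: str | None = None,
-- ) -> str | None:
--     """Replace or append to a section in a markdown body. Returns None if section not found."""
--     lines = body.split("\n")
--     new_lines = []
--     in_section = False
--     section_level = 0
--     found = False
--
--     for line in lines:
--         if not in_section and line.startswith("#") and section.lower() in line.lower():
--             in_section = True
--             section_level = len(line) - len(line.lstrip("#"))
--             found = True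
--             new_lines.append(line)
--
--             if section_content is not None:
--                 # Replace section content
--                 new_lines.append("")
--                 new_lines.append(section_content.strip())
--                 new_lines.append("")
--             elif append_text is not None:
--                 # Keep existing content, we'll append after it
--                 pass
--             continue
--
--         if in_section:
--             if line.startswith("#"):
--                 current_level = len(line) - len(line.lstrip("#"))
--                 if current_level <= section_level:
--                     in_section = False
--                     if append_text is not None:
--                         # Append before the next heading
--                         new_lines.append(append_text.strip())
--                         new_lines.append("")
--                     new_lines.append(line)
--                     continue
--
--             if section_content is not None:
--                 # Skip old section content (already replaced)
--                 continue
--             else: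
--                 # Keep existing content (for append mode)
--                 new_lines.append(line)
--         else:
--             new_lines.append(line)
--
--     # If section was the last one, append at end
--     if in_section and append_text is not None:
--         new_lines.append(append_text.strip())
--         new_lines.append("")
--
--     if not found:
--         return None
--     return "\n".join(new_lines)
-- ===== SOURCE B (Python) =====
-- def _patch_section(
--     body: str,
--     section: str,
--     section_content: str | None = None,
--     append_text: str | None = None,
-- ) -> str | None:
--     """Region-based rewrite: locate each matching heading's region boundary once,
--     then emit the patched region from slices instead of a per-line state machine."""
--     lines = body.split("\n")
--     needle = section.lower()
--     n = len(lines)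
--
--     def level(ln):
--         return len(ln) - len(ln.lstrip("#"))
--
--     out = []
--     found = False
--     i = 0
--     while i < n:
--         ln = lines[i]
--         if not (ln.startswith("#") and needle in ln.lower()):
--             out.append(ln)
--             i += 1
--             continue
--         found = True
--         lvl = level(ln)
--         j = i + 1
--         while j < n and not (lines[j].startswith("#") and level(lines[j]) <= lvl):
--             j += 1
--         out.append(ln)
--         if section_content is not None:
--             out += ["", section_content.strip(), ""]
--         else:
--             out.extend(lines[i + 1:j])
--         if append_text is not None:
--             out += [append_text.strip(), ""]
--         if j < n:
--             out.append(lines[j])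
--         i = j + 1
--     if not found:
--         return None
--     return "\n".join(out)
-- ===== Notes on version B (the rewrite author's own statement) =====
-- stated objective: alternative
-- what changed: Replaces A's per-line in_section state machine with a region scan that locates each matching heading's boundary once (inner scan / takeWhile split) and emits the patched region from slices.
import Mathlib
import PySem

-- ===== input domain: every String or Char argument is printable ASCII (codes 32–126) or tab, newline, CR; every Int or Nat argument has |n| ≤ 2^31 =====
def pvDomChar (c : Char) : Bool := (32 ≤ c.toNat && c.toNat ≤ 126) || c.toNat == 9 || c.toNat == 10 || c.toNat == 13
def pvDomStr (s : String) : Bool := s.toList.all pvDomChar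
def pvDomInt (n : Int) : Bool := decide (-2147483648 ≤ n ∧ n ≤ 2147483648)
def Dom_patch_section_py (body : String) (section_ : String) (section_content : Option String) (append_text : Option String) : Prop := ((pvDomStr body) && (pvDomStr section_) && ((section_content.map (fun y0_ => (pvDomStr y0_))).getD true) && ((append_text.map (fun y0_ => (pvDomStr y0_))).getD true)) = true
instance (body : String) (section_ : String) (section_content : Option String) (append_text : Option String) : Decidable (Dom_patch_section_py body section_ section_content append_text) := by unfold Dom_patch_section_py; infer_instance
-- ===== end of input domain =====

-- B rewrites A's per-line in_section state machine as a region scan (find each matching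
-- heading's boundary once, then emit the patched region from slices); same cost, different
-- decomposition ("alternative").

-- ===== PORT A =====

-- len(line) - len(line.lstrip("#")): lstrip("#") drops leading '#' chars; exact.
def pvLevel (cs : List Char) : Nat := cs.length - (cs.dropWhile (fun c => c == '#')).length

-- line.startswith("#") and section.lower() in line.lower()  (needle = section.lower())
def pvIsHead (needle ln : List Char) : Bool :=
  PySem.Chars.startswith ln ['#'] && PySem.Chars.isIn needle (PySem.Chars.lower ln)

-- one iteration of A's for-loop; state = (new_lines, in_section, section_level, found)
def pvAStep (needle : List Char) (sc ac : Option (List Char))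
    (st : List (List Char) × Bool × Nat × Bool) (ln : List Char) :
    List (List Char) × Bool × Nat × Bool :=
  let (nl, ins, lvl, fnd) := st
  if !ins && pvIsHead needle ln then
    let nl := nl ++ [ln]
    match sc with
    | some c => (nl ++ [[], PySem.Chars.strip c, []], true, pvLevel ln, true)
    | none => (nl, true, pvLevel ln, true)
  else if ins then
    if PySem.Chars.startswith ln ['#'] && pvLevel ln ≤ lvl then
      ((match ac with
        | some a => nl ++ [PySem.Chars.strip a, []]
        | none => nl) ++ [ln], false, lvl, fnd)
    else if sc.isSome then (nl, ins, lvl, fnd)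
    else (nl ++ [ln], ins, lvl, fnd)
  else (nl ++ [ln], ins, lvl, fnd)

def patch_section_py (body : String) (section_ : String) (section_content : Option String) (append_text : Option String) : Option String :=
  let lines := PySem.Chars.splitOn body.toList ['\n']
  let needle := PySem.Chars.lower section_.toList
  let sc := section_content.map String.toList
  let ac := append_text.map String.toList
  let (nl, ins, _, fnd) := lines.foldl (pvAStep needle sc ac) ([], false, 0, false)
  -- if in_section and append_text is not None: append at end
  let nl := match ac, ins with
    | some a, true => nl ++ [PySem.Chars.strip a, []]
    | _, _ => nl
  if fnd then some (String.ofList (PySem.Chars.join ['\n'] nl)) else none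

-- ===== PORT B =====

-- lines[j].startswith("#") and level(lines[j]) <= lvl : the region boundary test
def pvBoundary (lvl : Nat) (ln : List Char) : Bool :=
  PySem.Chars.startswith ln ['#'] && pvLevel ln ≤ lvl

-- B's outer while loop: returns (out, found); the inner while-scan for j is the
-- takeWhile/dropWhile split of the remaining lines at the first boundary line.
def pvBScan (needle : List Char) (sc ac : Option (List Char)) :
    List (List Char) → List (List Char) × Bool
  | [] => ([], false)
  | ln :: rest =>
    if pvIsHead needle ln then
      let lvl := pvLevel ln
      let mid := match sc with
        | some c => [[], PySem.Chars.strip c, []]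
        | none => rest.takeWhile (fun l => !pvBoundary lvl l)   -- lines[i+1:j]
      let app := match ac with
        | some a => [PySem.Chars.strip a, []]
        | none => []
      match _h : rest.dropWhile (fun l => !pvBoundary lvl l) with  -- lines[j:]
      | [] => (ln :: (mid ++ app), true)
      | b :: t =>
        let (out, _) := pvBScan needle sc ac t
        (ln :: (mid ++ app ++ b :: out), true)
    else
      let (out, fnd) := pvBScan needle sc ac rest
      (ln :: out, fnd)
termination_by ls => ls.length
decreasing_by
  · have h1 : (rest.dropWhile (fun l => !pvBoundary (pvLevel ln) l)).length ≤ rest.length :=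
      List.length_dropWhile_le _ _
    rw [_h] at h1
    simp at h1 ⊢
    omega
  · simp

def patch_section_py_alt (body : String) (section_ : String) (section_content : Option String) (append_text : Option String) : Option String :=
  let lines := PySem.Chars.splitOn body.toList ['\n']
  let needle := PySem.Chars.lower section_.toList
  let (out, fnd) := pvBScan needle (section_content.map String.toList) (append_text.map String.toList) lines
  if fnd then some (String.ofList (PySem.Chars.join ['\n'] out)) else none

-- ===== PRECONDITION & SPEC =====
def Spec_patch_section_py (body : String) (section_ : String) (section_content : Option String) (append_text : Option String) (out : Option String) : Prop := out = patch_section_py_alt body section_ section_content append_text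
instance (body : String) (section_ : String) (section_content : Option String) (append_text : Option String) (out : Option String) : Decidable (Spec_patch_section_py body section_ section_content append_text out) := by unfold Spec_patch_section_py; infer_instance

-- ===== CLAIM (what is proved, stated in full; the proofs are below) =====
def Claim_equal_patch_section_py : Prop := ∀ (body : String) (section_ : String) (section_content : Option String) (append_text : Option String), Dom_patch_section_py body section_ section_content append_text → Spec_patch_section_py body section_ section_content append_text (patch_section_py body section_ section_content append_text)

-- ===== LEMMAS AND PROOFS =====


-- unfolding lemmas for pvBScan's three branches
theorem pvBScan_cons_not (needle : List Char) (sc ac : Option (List Char)) (ln : List Char)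
    (rest : List (List Char)) (hh : pvIsHead needle ln = false) :
    pvBScan needle sc ac (ln :: rest) =
      (ln :: (pvBScan needle sc ac rest).1, (pvBScan needle sc ac rest).2) := by
  rw [pvBScan.eq_def]
  simp [hh]

theorem pvBScan_cons_head_nil (needle : List Char) (sc ac : Option (List Char)) (ln : List Char)
    (rest : List (List Char)) (hh : pvIsHead needle ln = true)
    (hdw : rest.dropWhile (fun l => !pvBoundary (pvLevel ln) l) = []) :
    pvBScan needle sc ac (ln :: rest) =
      (ln :: ((match sc with
        | some c => [[], PySem.Chars.strip c, []]
        | none => rest.takeWhile (fun l => !pvBoundary (pvLevel ln) l)) ++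
       (match ac with | some a => [PySem.Chars.strip a, []] | none => [])), true) := by
  rw [pvBScan.eq_def]
  simp only [hh, if_true]
  split
  · rfl
  · rename_i b t heq
    rw [hdw] at heq
    exact absurd heq (by simp)

theorem pvBScan_cons_head_cons (needle : List Char) (sc ac : Option (List Char)) (ln : List Char)
    (rest : List (List Char)) (b : List Char) (t : List (List Char)) (hh : pvIsHead needle ln = true)
    (hdw : rest.dropWhile (fun l => !pvBoundary (pvLevel ln) l) = b :: t) :
    pvBScan needle sc ac (ln :: rest) =
      (ln :: ((match sc with
        | some c => [[], PySem.Chars.strip c, []]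
        | none => rest.takeWhile (fun l => !pvBoundary (pvLevel ln) l)) ++
       (match ac with | some a => [PySem.Chars.strip a, []] | none => []) ++
       b :: (pvBScan needle sc ac t).1), true) := by
  rw [pvBScan.eq_def]
  simp only [hh, if_true]
  split
  · rename_i heq
    rw [hdw] at heq
    exact absurd heq (by simp)
  · rename_i b2 t2 heq
    rw [hdw] at heq
    cases heq
    rfl

-- A's loop while in_section = true: it consumes the region body (skipping it in replace
-- mode, keeping it otherwise) up to the first boundary line, where it flushes the append
-- text, emits the boundary line and goes back to in_section = false.
theorem pvInsideRun (needle : List Char) (sc ac : Option (List Char)) :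
    ∀ (rest : List (List Char)) (nl : List (List Char)) (lvl : Nat) (fnd : Bool),
      rest.foldl (pvAStep needle sc ac) (nl, true, lvl, fnd) =
        (let mid := if sc.isSome then [] else rest.takeWhile (fun l => !pvBoundary lvl l)
         match rest.dropWhile (fun l => !pvBoundary lvl l) with
         | [] => (nl ++ mid, true, lvl, fnd)
         | b :: t =>
           t.foldl (pvAStep needle sc ac)
             ((nl ++ mid ++ (match ac with
               | some a => [PySem.Chars.strip a, []]
               | none => [])) ++ [b], false, lvl, fnd)) := by
  intro rest
  induction rest with
  | nil => intro nl lvl fnd; cases sc <;> simp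
  | cons ln rest ih =>
    intro nl lvl fnd
    by_cases hb : pvBoundary lvl ln
    · have hstep : pvAStep needle sc ac (nl, true, lvl, fnd) ln =
        ((match ac with
          | some a => nl ++ [PySem.Chars.strip a, []]
          | none => nl) ++ [ln], false, lvl, fnd) := by
        simp only [pvBoundary] at hb
        cases ac <;> simp [pvAStep, hb]
      simp only [List.foldl_cons, hstep, List.takeWhile_cons, List.dropWhile_cons, hb]
      cases sc <;> cases ac <;> simp
    · have hstep : pvAStep needle sc ac (nl, true, lvl, fnd) ln =
        (if sc.isSome then (nl, true, lvl, fnd) else (nl ++ [ln], true, lvl, fnd)) := by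
        simp only [pvBoundary] at hb
        cases sc <;> simp [pvAStep, hb]
      simp only [List.foldl_cons, hstep, List.takeWhile_cons, List.dropWhile_cons, hb]
      cases hsc : sc with
      | some c =>
        simp only [Option.isSome_some, if_true]
        have := ih nl lvl fnd
        rw [hsc] at this
        simpa using this
      | none =>
        simp only [Option.isSome_none, Bool.false_eq_true, if_false]
        have := ih (nl ++ [ln]) lvl fnd
        rw [hsc] at this
        rw [this]
        cases hdw : rest.dropWhile (fun l => !pvBoundary lvl l) <;> simp

-- finalize A's state: the end-of-file append in append mode, and the found flag
def pvFinA (ac : Option (List Char)) (st : List (List Char) × Bool × Nat × Bool) :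
    List (List Char) × Bool :=
  (match ac, st.2.1 with
   | some a, true => st.1 ++ [PySem.Chars.strip a, []]
   | _, _ => st.1, st.2.2.2)

theorem pvMain (needle : List Char) (sc ac : Option (List Char)) :
    ∀ (n : Nat) (lines : List (List Char)), lines.length ≤ n →
      ∀ (nl : List (List Char)) (lvl : Nat) (fnd : Bool),
        pvFinA ac (lines.foldl (pvAStep needle sc ac) (nl, false, lvl, fnd)) =
          (nl ++ (pvBScan needle sc ac lines).1, fnd || (pvBScan needle sc ac lines).2) := by
  intro n
  induction n with
  | zero =>
    intro lines hlen nl lvl fnd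
    have h0 : lines = [] := List.eq_nil_of_length_eq_zero (Nat.le_zero.mp hlen)
    subst h0
    cases ac <;> simp [pvBScan, pvFinA]
  | succ n ih =>
    intro lines hlen nl lvl fnd
    cases lines with
    | nil => cases ac <;> simp [pvBScan, pvFinA]
    | cons ln rest =>
      simp only [List.length_cons, Nat.add_le_add_iff_right] at hlen
      by_cases hh : pvIsHead needle ln
      · have hstep : pvAStep needle sc ac (nl, false, lvl, fnd) ln =
          ((nl ++ [ln]) ++ (match sc with
            | some c => [[], PySem.Chars.strip c, []]
            | none => []), true, pvLevel ln, true) := by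
          cases sc <;> simp [pvAStep, hh]
        simp only [List.foldl_cons, hstep]
        rw [pvInsideRun]
        cases hdw : rest.dropWhile (fun l => !pvBoundary (pvLevel ln) l) with
        | nil =>
          rw [pvBScan_cons_head_nil needle sc ac ln rest hh hdw]
          cases sc <;> cases ac <;> simp [pvFinA]
        | cons b t =>
          have hlt : t.length ≤ n := by
            have h2 := List.length_dropWhile_le (fun l => !pvBoundary (pvLevel ln) l) rest
            rw [hdw] at h2; simp at h2; omega
          rw [ih t hlt]
          rw [pvBScan_cons_head_cons needle sc ac ln rest b t hh hdw]
          cases sc <;> cases ac <;> simp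
      · have hstep : pvAStep needle sc ac (nl, false, lvl, fnd) ln =
          (nl ++ [ln], false, lvl, fnd) := by
          simp [pvAStep, hh]
        simp only [List.foldl_cons, hstep]
        rw [ih rest hlen]
        rw [pvBScan_cons_not needle sc ac ln rest (by simpa using hh)]
        simp

-- ===== VERDICT (by name: the statement is the Claim_ definition above) =====
theorem patch_section_py_spec : Claim_equal_patch_section_py := by
  intro body section_ sc0 ac0 _
  unfold Spec_patch_section_py patch_section_py patch_section_py_alt
  have h := pvMain (PySem.Chars.lower section_.toList) (sc0.map String.toList)
      (ac0.map String.toList) (PySem.Chars.splitOn body.toList ['\n']).length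
      (PySem.Chars.splitOn body.toList ['\n']) le_rfl [] 0 false
  rcases hst : (PySem.Chars.splitOn body.toList ['\n']).foldl
      (pvAStep (PySem.Chars.lower section_.toList) (sc0.map String.toList) (ac0.map String.toList))
      ([], false, 0, false) with ⟨nl, ins, lvl, fnd⟩
  rcases hbs : pvBScan (PySem.Chars.lower section_.toList) (sc0.map String.toList)
      (ac0.map String.toList) (PySem.Chars.splitOn body.toList ['\n']) with ⟨out, fnd2⟩
  rw [hst, hbs] at h
  unfold pvFinA at h
  simp only [List.nil_append, Bool.false_or, Prod.mk.injEq] at h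
  obtain ⟨h1, h2⟩ := h
  simp only [hst, hbs]
  subst h2
  cases ac0 <;> cases ins <;> simp_all
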